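-- pv_equiv track=rewrite | github.com/magnate3/linux-riscv-dev | nccl/plugin/ncclsee/parse_nccl.py | create_bucket_labels
-- ===== SOURCE A (Python) =====
-- def create_bucket_labels(limits):
--     """Creates human-readable labels for the buckets based on count."""
--     labels = []
--     lower_bound = 0
--     for limit in limits:
--         labels.append(f"{lower_bound} <= count < {limit}")
--         lower_bound = limit
--     labels.append(f"count >= {lower_bound}")
--     return labels
-- ===== SOURCE B (Python) =====
-- def create_bucket_labels(limits):
--     """Creates human-readable labels for the buckets based on count."""
--     lims = list(limits)
--     n = len(lims)
--     last = lims[n - 1] if n else 0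
--     out = [f"count >= {last}"]
--     for i in reversed(range(n)):
--         lo = lims[i - 1] if i else 0
--         out.append(f"{lo} <= count < {lims[i]}")
--     out.reverse()
--     return out
-- ===== Notes on version B (the rewrite author's own statement) =====
-- stated objective: alternative
-- what changed: Builds the label list back-to-front: it emits the final 'count >=' label first, then walks the indices in reverse, looking each bucket's lower bound up by random access (lims[i-1], or 0 at index 0) instead of threading a running lower_bound accumulator, and reverses the result at the end.
import Mathlib
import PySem

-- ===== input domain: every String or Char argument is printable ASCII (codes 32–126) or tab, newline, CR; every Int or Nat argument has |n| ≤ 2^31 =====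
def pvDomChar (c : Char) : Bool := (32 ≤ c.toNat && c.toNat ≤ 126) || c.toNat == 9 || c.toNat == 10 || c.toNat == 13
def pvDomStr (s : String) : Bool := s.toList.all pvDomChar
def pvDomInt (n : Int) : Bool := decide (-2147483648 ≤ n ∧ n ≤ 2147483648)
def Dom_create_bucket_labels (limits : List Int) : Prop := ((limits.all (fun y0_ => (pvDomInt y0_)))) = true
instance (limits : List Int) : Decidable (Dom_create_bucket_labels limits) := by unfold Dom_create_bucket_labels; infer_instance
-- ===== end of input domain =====

-- B builds the labels back-to-front: final label first, then a reverse walk over the indices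
-- looking each lower bound up by random access, and a final reverse; no running lower_bound state.

-- ===== PORT A =====
def create_bucket_labels (limits : List Int) : List String :=
  let st := limits.foldl
    (fun (p : List String × Int) limit =>
      (p.1 ++ [PySem.Int.toStr p.2 ++ " <= count < " ++ PySem.Int.toStr limit], limit))
    ([], 0)
  st.1 ++ ["count >= " ++ PySem.Int.toStr st.2]

-- ===== PORT B =====
def create_bucket_labels_alt (limits : List Int) : List String :=
  let lims := limits
  let n := lims.length
  let last : Int := if n ≠ 0 then PySem.List.pyGetD lims ((n : Int) - 1) 0 else 0
  let out := (List.range n).reverse.foldl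
    (fun (out : List String) (i : Nat) =>
      let lo : Int := if i ≠ 0 then PySem.List.pyGetD lims ((i : Int) - 1) 0 else 0
      out ++ [PySem.Int.toStr lo ++ " <= count < "
               ++ PySem.Int.toStr (PySem.List.pyGetD lims (i : Int) 0)])
    ["count >= " ++ PySem.Int.toStr last]
  out.reverse

-- ===== PRECONDITION & SPEC =====
def Spec_create_bucket_labels (limits : List Int) (out : List String) : Prop := out = create_bucket_labels_alt limits
instance (limits : List Int) (out : List String) : Decidable (Spec_create_bucket_labels limits out) := by unfold Spec_create_bucket_labels; infer_instance

-- ===== CLAIM (what is proved, stated in full; the proofs are below) =====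
def Claim_equal_create_bucket_labels : Prop := ∀ (limits : List Int), Dom_create_bucket_labels limits → Spec_create_bucket_labels limits (create_bucket_labels limits)

-- ===== LEMMAS AND PROOFS =====

-- A's fold, characterised: labels are a map over zip of the zero-prepended list with the list,
-- and the final lower bound is the last element of the zero-prepended list.
theorem cbl_fold (limits : List Int) : ∀ (acc : List String) (lb : Int),
    limits.foldl
      (fun (p : List String × Int) limit =>
        (p.1 ++ [PySem.Int.toStr p.2 ++ " <= count < " ++ PySem.Int.toStr limit], limit))
      (acc, lb)
    = (acc ++ (List.zip (lb :: limits) limits).map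
        (fun lohi => PySem.Int.toStr lohi.1 ++ " <= count < " ++ PySem.Int.toStr lohi.2),
       (lb :: limits).getLast (by simp)) := by
  induction limits with
  | nil => simp
  | cons x xs ih =>
    intro acc lb
    simp only [List.foldl_cons, ih]
    cases xs with
    | nil => simp
    | cons y ys => simp [List.getLast]

-- B's per-index label equals A's per-pair label, pointwise.
theorem cbl_zip_eq_range (l : List Int) :
    (List.zip ((0 : Int) :: l) l).map
      (fun lohi => PySem.Int.toStr lohi.1 ++ " <= count < " ++ PySem.Int.toStr lohi.2)
    = (List.range l.length).map
      (fun (i : Nat) => PySem.Int.toStr (if i ≠ 0 then PySem.List.pyGetD l ((i : Int) - 1) 0 else 0)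
                ++ " <= count < " ++ PySem.Int.toStr (PySem.List.pyGetD l (i : Int) 0)) := by
  apply List.ext_getElem
  · simp [List.length_zip]
  · intro i h1 h2
    have hi : i < l.length := by simpa using h2
    simp only [List.getElem_map, List.getElem_zip, List.getElem_range]
    have hcur : PySem.List.pyGetD l (i : Int) 0 = l[i] := by
      rw [PySem.List.pyGetD_natCast]; exact List.getD_eq_getElem l 0 hi
    rcases i with _ | j
    · simp only [Nat.cast_zero] at hcur
      simp [hcur]
    · have e1 : PySem.List.pyGetD l ((j : Int) + 1) 0 = l[j + 1] := by
        rw [show ((j : Nat) : Int) + 1 = ((j + 1 : Nat) : Int) by push_cast; ring,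
            PySem.List.pyGetD_natCast]
        exact List.getD_eq_getElem l 0 hi
      simp [e1, List.getD, List.getElem?_eq_getElem (show j < l.length by omega)]

-- B's final lower bound equals the last element of the zero-prepended list.
theorem cbl_last (l : List Int) :
    (if l.length ≠ 0 then PySem.List.pyGetD l ((l.length : Int) - 1) 0 else 0)
    = ((0 : Int) :: l).getLast (by simp) := by
  cases l with
  | nil => simp
  | cons x xs =>
    have hcast : (((x :: xs).length : Int) - 1) = ((xs.length : Nat) : Int) := by
      push_cast [List.length_cons]; omega
    rw [if_pos (by simp), hcast, PySem.List.pyGetD_natCast]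
    rw [List.getD_eq_getElem (x :: xs) 0 (by simp), List.getLast_eq_getElem]
    simp [List.getElem_cons_succ]
    rfl

-- ===== VERDICT (by name: the statement is the Claim_ definition above) =====
theorem create_bucket_labels_spec : Claim_equal_create_bucket_labels := by
  intro limits _
  unfold Spec_create_bucket_labels create_bucket_labels create_bucket_labels_alt
  simp only [cbl_fold limits [] 0, List.nil_append]
  rw [PySem.List.foldl_append_singleton_eq_map]
  simp only [List.reverse_append, List.map_reverse, List.reverse_reverse, List.reverse_singleton]
  rw [cbl_zip_eq_range, cbl_last]
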